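-- pv_equiv track=rewrite | github.com/mikeleske/alfreed | src/alfreed/core/entities/taxonomy.py | calculate_taxonomy_consensus
-- ===== SOURCE A (Python) =====
-- from typing import Dict, Optional
--
-- def calculate_taxonomy_consensus(
--     taxonomies: list[Dict[str, str]], min_frequency: int = 3
-- ) -> Dict[str, str]:
--     """
--     Calculate taxonomic consensus from multiple taxonomy results.
--
--     Args:
--         taxonomies: List of parsed taxonomy dictionaries
--         min_frequency: Minimum frequency required for consensus
--
--     Returns:
--         Consensus taxonomy dictionary
--     """
--     from collections import Counter
--
--     if not taxonomies:
--         return {}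
--
--     hierarchy = ["Domain", "Phylum", "Class", "Order", "Family", "Genus", "Species"]
--     consensus = {}
--
--     for level in hierarchy:
--         # Get all values for this level
--         values = [tax.get(level) for tax in taxonomies if tax.get(level)]
--
--         if not values:
--             continue
--
--         # Count frequencies
--         count = Counter(values)
--         most_common_val, freq = count.most_common(1)[0]
--
--         # Only include in consensus if frequency meets threshold
--         if freq >= min_frequency:
--             consensus[level] = most_common_val
--         else:
--             # Stop at first level without consensus
--             break
--
--     return consensus
-- ===== SOURCE B (Python) =====
-- from typing import Dict
--
--
-- def calculate_taxonomy_consensus(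
--     taxonomies: list[Dict[str, str]], min_frequency: int = 3
-- ) -> Dict[str, str]:
--     """Recursive walk down the hierarchy; per level a seen-list scan with
--     list.count picks the first value of maximal multiplicity (no Counter,
--     no sorting, no dict of counts)."""
--     if not taxonomies:
--         return {}
--     hierarchy = ["Domain", "Phylum", "Class", "Order", "Family", "Genus", "Species"]
--     return dict(_consensus(taxonomies, hierarchy, min_frequency))
--
--
-- def _consensus(taxonomies, levels, min_frequency):
--     if not levels:
--         return []
--     level = levels[0]
--     values = [tax.get(level) for tax in taxonomies if tax.get(level)]
--     if not values:
--         return _consensus(taxonomies, levels[1:], min_frequency)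
--     # first value of maximal multiplicity: scan once, counting each distinct
--     # value by brute force; a strictly greater count replaces the best, so
--     # ties keep the earliest value.
--     seen = []
--     best, best_n = None, 0
--     for v in values:
--         if v in seen:
--             continue
--         seen.append(v)
--         n = values.count(v)
--         if n > best_n:
--             best, best_n = v, n
--     if best_n >= min_frequency:
--         return [(level, best)] + _consensus(taxonomies, levels[1:], min_frequency)
--     return []
-- ===== Notes on version B (the rewrite author's own statement) =====
-- stated objective: alternative
-- what changed: B drops Counter and the consensus dict entirely: it recurses over the hierarchy building the result list by cons, and per level finds the first value of maximal multiplicity by a seen-list scan with list.count instead of hashing into a Counter and sorting its items.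
import Mathlib
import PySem

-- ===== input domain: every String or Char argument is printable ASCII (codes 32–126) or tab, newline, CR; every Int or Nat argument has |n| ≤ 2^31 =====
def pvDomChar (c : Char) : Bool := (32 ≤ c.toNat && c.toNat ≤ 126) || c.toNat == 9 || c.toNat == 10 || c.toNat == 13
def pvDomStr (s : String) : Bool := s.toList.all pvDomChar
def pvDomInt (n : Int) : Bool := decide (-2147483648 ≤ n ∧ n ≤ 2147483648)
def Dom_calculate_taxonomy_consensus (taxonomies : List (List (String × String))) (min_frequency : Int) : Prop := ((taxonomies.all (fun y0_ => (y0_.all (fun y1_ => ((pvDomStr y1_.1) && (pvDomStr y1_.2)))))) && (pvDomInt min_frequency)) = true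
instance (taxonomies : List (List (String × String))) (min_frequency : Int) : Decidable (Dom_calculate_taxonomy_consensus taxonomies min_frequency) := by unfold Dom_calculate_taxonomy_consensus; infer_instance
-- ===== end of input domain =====

-- B replaces A's Counter+most_common per level and the consensus dict by a recursion over the
-- hierarchy building the result list directly, picking each level's first maximal value by a
-- seen-list scan with list.count (alternative decomposition, no hashing/sorting; same cost class).


-- hierarchy list shared by both Pythons (same literal in Source A and Source B)
def pvHierarchy : List String := ["Domain", "Phylum", "Class", "Order", "Family", "Genus", "Species"]

-- tax.get(level): first-match lookup in the association list (both Pythons call it)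
def pvTaxGet (tax : List (String × String)) (level : String) : Option String :=
  PySem.Dict.get? (PySem.Dict.mk tax) level

-- [tax.get(level) for tax in taxonomies if tax.get(level)]  (truthy: not None and not "";
-- the identical comprehension line appears in Source A and Source B)
def pvValues (taxonomies : List (List (String × String))) (level : String) : List String :=
  taxonomies.filterMap (fun tax =>
    match pvTaxGet tax level with
    | some v => if v = "" then none else some v
    | none => none)

-- ===== PORT A =====
-- A's 'for level in hierarchy' loop with its continue/break and the consensus dict
def pvALoop (taxonomies : List (List (String × String))) (min_frequency : Int) :
    List String → PySem.Dict String String → PySem.Dict String String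
  | [], consensus => consensus
  | level :: rest, consensus =>
    let values := pvValues taxonomies level
    if values = [] then pvALoop taxonomies min_frequency rest consensus
    else
      let count := PySem.Dict.counter values
      -- count.most_common(1)[0]: head of the stable descending sort of items by count;
      -- values ≠ [] so the sorted list is nonempty and the headD default is unreachable
      let mcf := (PySem.List.sorted count.items (fun p => p.2) true).headD ("", 0)
      if mcf.2 ≥ min_frequency then
        pvALoop taxonomies min_frequency rest (consensus.insert level mcf.1)
      else consensus

def calculate_taxonomy_consensus (taxonomies : List (List (String × String))) (min_frequency : Int) : List (String × String) :=
  if taxonomies = [] then []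
  else (pvALoop taxonomies min_frequency pvHierarchy PySem.Dict.empty).items

-- ===== PORT B =====
-- B's 'for v in values' scan: state (seen, best, best_n); 'if v in seen: continue',
-- 'seen.append(v)', 'n = values.count(v)', 'if n > best_n: best, best_n = v, n'
def pvBBest (values : List String) : List String × Option String × Int :=
  values.foldl (fun st v =>
    if st.1.contains v then st
    else
      let n : Int := (PySem.List.count values v : Int)
      (st.1 ++ [v], if st.2.2 < n then (some v, n) else st.2)) ([], none, 0)

-- B's recursion '_consensus(taxonomies, levels, min_frequency)'
def pvBRec (taxonomies : List (List (String × String))) (min_frequency : Int) :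
    List String → List (String × String)
  | [] => []
  | level :: rest =>
    let values := pvValues taxonomies level
    if values = [] then pvBRec taxonomies min_frequency rest
    else
      -- st = (seen, best, best_n); best is never None here (values ≠ [] forces an update),
      -- so getD "" is unreachable
      if (pvBBest values).2.2 ≥ min_frequency then
        (level, (pvBBest values).2.1.getD "") :: pvBRec taxonomies min_frequency rest
      else []

def calculate_taxonomy_consensus_alt (taxonomies : List (List (String × String))) (min_frequency : Int) : List (String × String) :=
  if taxonomies = [] then []
  else (PySem.Dict.ofList (pvBRec taxonomies min_frequency pvHierarchy)).items

-- ===== PRECONDITION & SPEC =====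
def Spec_calculate_taxonomy_consensus (taxonomies : List (List (String × String))) (min_frequency : Int) (out : List (String × String)) : Prop := out = calculate_taxonomy_consensus_alt taxonomies min_frequency
instance (taxonomies : List (List (String × String))) (min_frequency : Int) (out : List (String × String)) : Decidable (Spec_calculate_taxonomy_consensus taxonomies min_frequency out) := by unfold Spec_calculate_taxonomy_consensus; infer_instance

-- ===== CLAIM =====
def Claim_equal_calculate_taxonomy_consensus : Prop := ∀ (taxonomies : List (List (String × String))) (min_frequency : Int), Dom_calculate_taxonomy_consensus taxonomies min_frequency → Spec_calculate_taxonomy_consensus taxonomies min_frequency (calculate_taxonomy_consensus taxonomies min_frequency)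

-- ===== LEMMAS AND PROOFS =====

-- head of an insertBy insertion, as the running-max step
theorem pv_head?_insertBy {α : Type} (before : α → α → Bool) (x : α) (ys : List α) :
    (PySem.List.insertBy before x ys).head? =
      some (match ys.head? with | none => x | some y => if before x y then x else y) := by
  cases ys with
  | nil => rfl
  | cons y t => simp only [PySem.List.insertBy, List.head?]; split_ifs <;> simp

-- head of the descending insertion-sort fold = running first-max fold
theorem pv_head?_sortfold {α : Type} (key : α → Int) (xs acc : List α) :
    (xs.foldl (fun a x => PySem.List.insertBy (fun a b => decide (key b < key a)) x a) acc).head? =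
      xs.foldl (fun m x =>
        match m with
        | none => some x
        | some m => if key m < key x then some x else some m) acc.head? := by
  induction xs generalizing acc with
  | nil => rfl
  | cons x t ih =>
      simp only [List.foldl_cons, ih, pv_head?_insertBy]
      cases acc.head? with
      | none => rfl
      | some y =>
          simp only [decide_eq_true_eq]
          by_cases h : key y < key x <;> simp [h]

-- head of sorted(xs, key, reverse=True) is max(xs, key): the first element with maximal key
theorem pv_head?_sorted_rev {α : Type} (key : α → Int) (xs : List α) :
    (PySem.List.sorted xs key true).head? = PySem.List.max? xs key := by
  simpa [PySem.List.sorted, PySem.List.max?] using pv_head?_sortfold key xs []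

-- the first-occurrence subsequence B's seen-test walks through
def pvNew (seen : List String) : List String → List String
  | [] => []
  | v :: vs => if seen.contains v then pvNew seen vs else v :: pvNew (seen ++ [v]) vs

-- the seen-list scan folds the best-update over exactly the first occurrences
theorem pv_fold_seen (values : List String) : ∀ (vs seen : List String) (acc : Option String × Int),
    (vs.foldl (fun st v =>
      if st.1.contains v then st
      else
        let n : Int := (PySem.List.count values v : Int)
        (st.1 ++ [v], if st.2.2 < n then (some v, n) else st.2)) (seen, acc)).2 =
    (pvNew seen vs).foldl (fun acc v =>
        let n : Int := (PySem.List.count values v : Int)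
        if acc.2 < n then (some v, n) else acc) acc := by
  intro vs
  induction vs with
  | nil => intro seen acc; rfl
  | cons v t ih =>
      intro seen acc
      by_cases h : seen.contains v
      · simp only [List.foldl_cons, pvNew, h, if_pos]
        exact ih seen acc
      · simp only [List.foldl_cons, pvNew, h, Bool.false_eq_true, if_false]
        rw [ih]

-- the first occurrences are ofList (seen = [] case below)
theorem pv_new_update : ∀ (vs seen : List String), seen.Nodup →
    seen ++ pvNew seen vs = PySem.Set.update seen vs := by
  intro vs
  induction vs with
  | nil => intro seen _; simp [pvNew, PySem.Set.update_nil]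
  | cons v t ih =>
      intro seen hnd
      rw [PySem.Set.update_cons]
      by_cases h : seen.contains v
      · have hvm : v ∈ seen := by simpa using h
        have hadd : PySem.Set.add seen v = seen := by simp [PySem.Set.add, hvm]
        simp only [pvNew, h, if_pos]
        rw [hadd]; exact ih seen hnd
      · have hvm : v ∉ seen := by simpa using h
        have hadd : PySem.Set.add seen v = seen ++ [v] := by simp [PySem.Set.add, hvm]
        have hnd' : (seen ++ [v]).Nodup := by
          rw [List.nodup_append]
          refine ⟨hnd, List.nodup_singleton v, ?_⟩
          intro a ha b hb e
          exact hvm ((List.mem_singleton.mp hb) ▸ e ▸ ha)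
        simp only [pvNew, h, Bool.false_eq_true, if_false]
        rw [hadd, ← ih (seen ++ [v]) hnd']
        simp
theorem pv_new_nil (vs : List String) : pvNew [] vs = PySem.Set.ofList vs := by
  have := pv_new_update vs [] List.nodup_nil
  simpa [PySem.Set.update_empty] using this

-- the best-update fold, once the state is some, is the plain running-max fold on pairs
theorem pv_fold_upd_some (values : List String) : ∀ (D : List String) (p : String × Int),
    D.foldl (fun acc v =>
        let n : Int := (PySem.List.count values v : Int)
        if acc.2 < n then (some v, n) else acc) (some p.1, p.2) =
    (fun q : String × Int => ((some q.1 : Option String), q.2))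
      (D.foldl (fun q v =>
        let n : Int := (PySem.List.count values v : Int)
        if q.2 < n then (v, n) else q) p) := by
  intro D
  induction D with
  | nil => intro p; rfl
  | cons d t ih =>
      intro p
      simp only [List.foldl_cons]
      by_cases h : p.2 < (PySem.List.count values d : Int)
      · simp only [h, if_pos]
        exact ih (d, (PySem.List.count values d : Int))
      · simp only [h, if_false]
        exact ih p

-- max(xs, key=snd) on a nonempty list is the plain running-max fold
theorem pv_maxfold (t : List (String × Int)) : ∀ (x : String × Int),
    PySem.List.max? (x :: t) (fun p => p.2) =
      some (t.foldl (fun m y => if m.2 < y.2 then y else m) x) := by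
  induction t with
  | nil => intro x; rfl
  | cons y t ih =>
      intro x
      have h1 : PySem.List.max? (x :: y :: t) (fun p : String × Int => p.2) =
          PySem.List.max? ((if x.2 < y.2 then y else x) :: t) (fun p => p.2) := by
        unfold PySem.List.max?
        simp only [List.foldl_cons]
        by_cases h : x.2 < y.2 <;> simp [h]
      rw [h1, ih, List.foldl_cons]

-- per level: B's scan result is exactly A's most_common(1)[0]
theorem pv_best_eq (values : List String) (h : values ≠ []) :
    (pvBBest values).2 =
      (some ((PySem.List.sorted (PySem.Dict.counter values).items (fun p => p.2) true).headD ("", 0)).1,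
       ((PySem.List.sorted (PySem.Dict.counter values).items (fun p => p.2) true).headD ("", 0)).2) := by
  obtain ⟨d, D, hD⟩ : ∃ d D, PySem.Set.ofList values = d :: D := by
    cases hv : PySem.Set.ofList values with
    | nil =>
        exfalso
        cases values with
        | nil => exact h rfl
        | cons a t => rw [PySem.Set.ofList_cons] at hv; cases hv
    | cons d D => exact ⟨d, D, rfl⟩
  have hdm : d ∈ values := by
    have : d ∈ PySem.Set.ofList values := by rw [hD]; exact List.mem_cons_self
    exact (PySem.Set.mem_ofList _ _).mp this
  have hpos : (0 : Int) < (PySem.List.count values d : Int) := by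
    have : 0 < List.count d values := List.count_pos_iff.mpr hdm
    simpa [PySem.List.count] using Int.ofNat_lt.mpr this
  -- B side
  have hB : (pvBBest values).2 =
      (fun q : String × Int => ((some q.1 : Option String), q.2))
        (D.foldl (fun q v =>
          let n : Int := (PySem.List.count values v : Int)
          if q.2 < n then (v, n) else q) (d, (PySem.List.count values d : Int))) := by
    unfold pvBBest
    rw [pv_fold_seen values values [] (none, 0), pv_new_nil, hD]
    simp only [List.foldl_cons, hpos, if_pos]
    exact pv_fold_upd_some values D (d, (PySem.List.count values d : Int))
  -- A side
  have hitems : (PySem.Dict.counter values).items =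
      (d, (PySem.List.count values d : Int)) ::
        D.map (fun k => (k, (PySem.List.count values k : Int))) := by
    rw [PySem.Dict.items_counter, hD]
    simp [PySem.List.count]
  have hA : (PySem.List.sorted (PySem.Dict.counter values).items (fun p => p.2) true).headD ("", 0) =
      D.foldl (fun q v =>
        let n : Int := (PySem.List.count values v : Int)
        if q.2 < n then (v, n) else q) (d, (PySem.List.count values d : Int)) := by
    rw [List.headD_eq_head?_getD, pv_head?_sorted_rev, hitems, pv_maxfold, List.foldl_map]
    rfl
  rw [hB, hA]

-- A's dict-building walk over the levels lists exactly B's cons-built result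
theorem pv_loop_items (txs : List (List (String × String))) (mf : Int) :
    ∀ (levels : List String), levels.Nodup →
    ∀ (consensus : PySem.Dict String String),
    (∀ ℓ ∈ levels, consensus.contains ℓ = false) →
    (pvALoop txs mf levels consensus).items = consensus.items ++ pvBRec txs mf levels := by
  intro levels
  induction levels with
  | nil => intro _ consensus _; simp [pvALoop, pvBRec]
  | cons level rest ih =>
      intro hnd consensus hfresh
      have hndr : rest.Nodup := (List.nodup_cons.mp hnd).2
      have hlr : level ∉ rest := (List.nodup_cons.mp hnd).1
      unfold pvALoop pvBRec
      by_cases hv : pvValues txs level = []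
      · simp only [hv, if_pos]
        exact ih hndr consensus (fun ℓ h => hfresh ℓ (List.mem_cons_of_mem _ h))
      · simp only [if_neg hv, pv_best_eq (pvValues txs level) hv]
        split_ifs with hf
        · have hc : consensus.contains level = false := hfresh level List.mem_cons_self
          have hfresh' : ∀ ℓ ∈ rest, (consensus.insert level
              ((PySem.List.sorted (PySem.Dict.counter (pvValues txs level)).items (fun p => p.2) true).headD ("", 0)).1).contains ℓ = false := by
            intro ℓ hℓ
            rw [PySem.Dict.contains_insert]
            have hne : ℓ ≠ level := fun e => hlr (e ▸ hℓ)
            simp [hne, hfresh ℓ (List.mem_cons_of_mem _ hℓ)]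
          rw [ih hndr _ hfresh',
              PySem.Dict.items_insert_of_not_contains consensus _ hc]
          simp
        · simp

-- a fold of inserts with pairwise-new keys just appends the pairs
theorem pv_items_foldl_insert : ∀ (pairs : List (String × String)) (d : PySem.Dict String String),
    (∀ p ∈ pairs, d.contains p.1 = false) → (pairs.map Prod.fst).Nodup →
    (pairs.foldl (fun d p => d.insert p.1 p.2) d).items = d.items ++ pairs := by
  intro pairs
  induction pairs with
  | nil => intro d _ _; simp
  | cons p ps ih =>
      intro d hfresh hnd
      simp only [List.map_cons, List.nodup_cons] at hnd
      simp only [List.foldl_cons]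
      rw [ih (d.insert p.1 p.2) ?_ hnd.2]
      · rw [PySem.Dict.items_insert_of_not_contains d _ (hfresh p List.mem_cons_self)]
        simp
      · intro q hq
        rw [PySem.Dict.contains_insert]
        have hne : q.1 ≠ p.1 := fun e => hnd.1 (e ▸ List.mem_map_of_mem hq)
        simp [hne, hfresh q (List.mem_cons_of_mem _ hq)]

-- B's keys follow the hierarchy order, hence are distinct
theorem pv_brec_fst_sublist (txs : List (List (String × String))) (mf : Int) :
    ∀ (levels : List String), ((pvBRec txs mf levels).map Prod.fst).Sublist levels := by
  intro levels
  induction levels with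
  | nil => simp [pvBRec]
  | cons level rest ih =>
      unfold pvBRec
      by_cases hv : pvValues txs level = []
      · simp only [hv, if_pos]
        exact ih.cons level
      · rw [if_neg hv]
        split_ifs
        · simp only [List.map_cons]
          exact ih.cons₂ level
        · simp

theorem pv_items_ofList_brec (txs : List (List (String × String))) (mf : Int) :
    (PySem.Dict.ofList (pvBRec txs mf pvHierarchy)).items = pvBRec txs mf pvHierarchy := by
  have hnd : ((pvBRec txs mf pvHierarchy).map Prod.fst).Nodup :=
    (pv_brec_fst_sublist txs mf pvHierarchy).nodup (by decide)
  have : PySem.Dict.ofList (pvBRec txs mf pvHierarchy) =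
      (pvBRec txs mf pvHierarchy).foldl (fun d p => d.insert p.1 p.2) PySem.Dict.empty := rfl
  rw [this, pv_items_foldl_insert _ _ (fun p _ => PySem.Dict.contains_empty p.1) hnd]
  rfl

-- ===== VERDICT (by name: the statement is the Claim_ definition above) =====
theorem calculate_taxonomy_consensus_spec : Claim_equal_calculate_taxonomy_consensus := by
  intro taxonomies min_frequency _
  unfold Spec_calculate_taxonomy_consensus calculate_taxonomy_consensus calculate_taxonomy_consensus_alt
  by_cases h : taxonomies = []
  · simp [h]
  · simp only [if_neg h]
    rw [pv_items_ofList_brec,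
        pv_loop_items taxonomies min_frequency pvHierarchy (by decide) PySem.Dict.empty
          (fun ℓ _ => PySem.Dict.contains_empty ℓ)]
    rfl
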